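-- pv_equiv track=rewrite | github.com/jsysunny/Coding | 250810/함수를 이용한 온전수 판별/determining-the-whole-number-using-a-function.py | count
-- ===== SOURCE A (Python) =====
-- def count(a,b):
--     cnt=0
--
--     for i in range(a,b+1):
--         iscount=True
--         if i%2==0:
--             iscount= False
--         elif i%10==5:
--             iscount= False
--         elif i%3==0 and i%9!=0:
--             iscount= False
--
--         if iscount:
--             cnt+=1
--
--     return cnt
-- ===== SOURCE B (Python) =====
-- # O(1) re-implementation: the predicate is periodic with period 90 = lcm(2,10,9),
-- # so count the valid residues once and use floor-division arithmetic over [a,b].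
-- _VALID = [r for r in range(90)
--           if r % 2 != 0 and r % 10 != 5 and not (r % 3 == 0 and r % 9 != 0)]
--
-- def count(a, b):
--     if a > b:
--         return 0
--     return sum((b - r) // 90 - (a - 1 - r) // 90 for r in _VALID)
-- ===== Notes on version B (the rewrite author's own statement) =====
-- stated objective: faster
-- what changed: Replaced the per-integer loop over [a,b] with a closed-form computation: the predicate is periodic modulo 90, so B precomputes the 28 valid residues and counts occurrences of each in [a,b] by floor division.
import Mathlib
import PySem

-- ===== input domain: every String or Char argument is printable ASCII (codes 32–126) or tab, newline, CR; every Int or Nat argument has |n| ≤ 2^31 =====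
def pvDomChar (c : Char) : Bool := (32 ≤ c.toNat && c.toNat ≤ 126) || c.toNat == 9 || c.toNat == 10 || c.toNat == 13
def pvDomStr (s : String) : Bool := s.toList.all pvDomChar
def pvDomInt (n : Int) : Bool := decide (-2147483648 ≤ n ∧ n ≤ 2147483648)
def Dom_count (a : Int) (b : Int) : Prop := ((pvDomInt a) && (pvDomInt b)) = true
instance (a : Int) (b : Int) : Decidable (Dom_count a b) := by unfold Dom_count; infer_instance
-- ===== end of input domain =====

-- B replaces A's per-integer loop by an O(1) closed form: the predicate is periodic mod 90,
-- so B counts each valid residue's occurrences in [a,b] by floor division (objective: faster).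

-- ===== PORT A =====
def count (a : Int) (b : Int) : Int :=
  (PySem.List.pyRange a (b + 1) 1).foldl
    (fun cnt i =>
      let iscount :=
        if PySem.Int.mod i 2 == 0 then false
        else if PySem.Int.mod i 10 == 5 then false
        else if PySem.Int.mod i 3 == 0 && PySem.Int.mod i 9 != 0 then false
        else true
      if iscount then cnt + 1 else cnt) 0

-- ===== PORT B =====
-- B's module-level list of valid residues mod 90 (the comprehension in Source B)
def pvValid : List Int :=
  (PySem.List.pyRange 0 90 1).filter
    (fun r => PySem.Int.mod r 2 != 0 && PySem.Int.mod r 10 != 5 &&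
              !(PySem.Int.mod r 3 == 0 && PySem.Int.mod r 9 != 0))

def count_alt (a : Int) (b : Int) : Int :=
  if a > b then 0
  else (pvValid.map (fun r =>
          PySem.Int.floordiv (b - r) 90 - PySem.Int.floordiv (a - 1 - r) 90)).sum

-- ===== PRECONDITION & SPEC =====
def Spec_count (a : Int) (b : Int) (out : Int) : Prop := out = count_alt a b
instance (a : Int) (b : Int) (out : Int) : Decidable (Spec_count a b out) := by unfold Spec_count; infer_instance

-- ===== CLAIM (what is proved, stated in full; the proofs are below) =====
def Claim_equal_count : Prop := ∀ (a : Int) (b : Int), Dom_count a b → Spec_count a b (count a b)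

-- ===== LEMMAS AND PROOFS =====

-- proof-side: A's loop-body predicate and its 0/1 indicator
def pvQ (i : Int) : Bool :=
  if PySem.Int.mod i 2 == 0 then false
  else if PySem.Int.mod i 10 == 5 then false
  else if PySem.Int.mod i 3 == 0 && PySem.Int.mod i 9 != 0 then false
  else true

def pvInd (i : Int) : Int := if pvQ i then 1 else 0

lemma pv_foldl_gen (q : Int → Bool) (l : List Int) (c : Int) :
    l.foldl (fun cnt i => if q i then cnt + 1 else cnt) c
      = c + (l.map (fun i => if q i then (1 : Int) else 0)).sum := by
  induction l generalizing c with
  | nil => simp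
  | cons x xs ih =>
      simp only [List.foldl_cons, List.map_cons, List.sum_cons, ih]
      split <;> ring

lemma count_eq_sum (a b : Int) :
    count a b = ((PySem.List.pyRange a (b + 1) 1).map pvInd).sum := by
  unfold count
  exact (pv_foldl_gen pvQ _ 0).trans (by rw [zero_add]; rfl)

lemma pv_sum_split (l : List Int) (f g h : Int → Int)
    (hfg : ∀ r ∈ l, f r = g r + h r) :
    (l.map f).sum = (l.map g).sum + (l.map h).sum := by
  induction l with
  | nil => simp
  | cons x xs ih =>
      simp only [List.map_cons, List.sum_cons]
      rw [hfg x (by simp), ih (fun r hr => hfg r (by simp [hr]))]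
      ring

lemma pv_sum_indicator (l : List Int) (m : Int) (hnd : l.Nodup) :
    (l.map (fun r => if m = r then (1 : Int) else 0)).sum = if m ∈ l then 1 else 0 := by
  induction l with
  | nil => simp
  | cons x xs ih =>
      simp only [List.map_cons, List.sum_cons, List.mem_cons]
      rcases List.nodup_cons.mp hnd with ⟨hx, hxs⟩
      by_cases hmx : m = x
      · subst hmx
        simp [ih hxs, hx]
      · simp [hmx, ih hxs]

lemma pv_tlem (b r : Int) (h0 : 0 ≤ r) (h1 : r < 90) :
    (b - r) / 90 - (b - 1 - r) / 90 = if b % 90 = r then (1 : Int) else 0 := by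
  split_ifs <;> omega

lemma pvInd_mod (b : Int) : pvInd b = pvInd (b % 90) := by
  unfold pvInd pvQ
  simp only [show ∀ x : Int, PySem.Int.mod x 2 = x % 2 from
               fun _ => PySem.Int.mod_eq_emod_of_pos (by norm_num),
             show ∀ x : Int, PySem.Int.mod x 10 = x % 10 from
               fun _ => PySem.Int.mod_eq_emod_of_pos (by norm_num),
             show ∀ x : Int, PySem.Int.mod x 3 = x % 3 from
               fun _ => PySem.Int.mod_eq_emod_of_pos (by norm_num),
             show ∀ x : Int, PySem.Int.mod x 9 = x % 9 from
               fun _ => PySem.Int.mod_eq_emod_of_pos (by norm_num)]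
  have h2 : b % 2 = (b % 90) % 2 := by omega
  have h10 : b % 10 = (b % 90) % 10 := by omega
  have h3 : b % 3 = (b % 90) % 3 := by omega
  have h9 : b % 9 = (b % 90) % 9 := by omega
  rw [h2, h10, h3, h9]

lemma pv_valid_nodup : pvValid.Nodup := by decide

lemma pv_valid_mem (m : Int) (h0 : 0 ≤ m) (h1 : m < 90) :
    (if m ∈ pvValid then (1 : Int) else 0) = pvInd m := by
  interval_cases m <;> decide

lemma pv_step_sum (b : Int) :
    (pvValid.map (fun r =>
        PySem.Int.floordiv (b - r) 90 - PySem.Int.floordiv (b - 1 - r) 90)).sum = pvInd b := by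
  have hmem : ∀ r ∈ pvValid, 0 ≤ r ∧ r < 90 := by decide
  have h1 : ∀ r ∈ pvValid,
      (fun r => PySem.Int.floordiv (b - r) 90 - PySem.Int.floordiv (b - 1 - r) 90) r
      = (fun r => if b % 90 = r then (1 : Int) else 0) r := by
    intro r hr
    obtain ⟨hr0, hr1⟩ := hmem r hr
    simp only [show ∀ x : Int, PySem.Int.floordiv x 90 = x / 90 from
                 fun _ => PySem.Int.floordiv_eq_ediv_of_pos (by norm_num)]
    exact pv_tlem b r hr0 hr1
  rw [List.map_congr_left h1, pv_sum_indicator pvValid (b % 90) pv_valid_nodup,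
      pv_valid_mem (b % 90) (by omega) (by omega), ← pvInd_mod]

lemma pv_main (a b : Int) : count a b = count_alt a b := by
  rcases lt_or_ge b a with hba | hab
  · -- empty interval: both are 0
    rw [count_eq_sum, PySem.List.pyRange_one_eq_nil (by omega)]
    unfold count_alt
    rw [if_pos hba]
    simp
  · -- a ≤ b: induction on (b - a).toNat
    obtain ⟨n, hn⟩ : ∃ n : Nat, b = a + n := ⟨(b - a).toNat, by omega⟩
    clear hab
    induction n generalizing b with
    | zero =>
        subst hn
        simp only [Nat.cast_zero, add_zero]
        rw [count_eq_sum, PySem.List.pyRange_one_succ_right (le_refl a),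
            PySem.List.pyRange_one_eq_nil (le_refl a)]
        unfold count_alt
        rw [if_neg (by omega)]
        rw [pv_step_sum a]
        simp
    | succ k ih =>
        have hstep : count a b = count a (b - 1) + pvInd b := by
          rw [count_eq_sum, count_eq_sum]
          have : b - 1 + 1 = b := by ring
          rw [this, PySem.List.pyRange_one_succ_right (by omega : a ≤ b)]
          simp
        have halt : count_alt a b = count_alt a (b - 1) + pvInd b := by
          unfold count_alt
          rw [if_neg (by omega)]
          by_cases hab1 : a > b - 1
          · -- a = b
            have hab' : a = b := by omega
            rw [if_pos hab1, ← pv_step_sum b, zero_add]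
            subst hab'
            rfl
          · rw [if_neg hab1]
            rw [pv_sum_split pvValid _
                  (fun r => PySem.Int.floordiv (b - 1 - r) 90 - PySem.Int.floordiv (a - 1 - r) 90)
                  (fun r => PySem.Int.floordiv (b - r) 90 - PySem.Int.floordiv (b - 1 - r) 90)
                  (fun r _ => by ring), pv_step_sum b]
        rw [hstep, halt, ih (b - 1) (by push_cast [hn]; ring)]

-- ===== VERDICT (by name: the statement is the Claim_ definition above) =====
theorem count_spec : Claim_equal_count := by
  intro a b _
  unfold Spec_count
  exact pv_main a b
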